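-- pv_equiv track=rewrite | github.com/isabert/programming_questions_binarysearch.com | Q519_Bit_Sum.py | solve
-- ===== SOURCE A (Python) =====
-- def solve(nums, k):
--     # masking, this method is faster
--     exp = 1
--     total = 0
--     for n in nums:
--         total += n
--
--     while (True):
--         for n in nums:
--             if (n & exp == 0 and k != 0):
--                 total += exp
--                 k -= 1
--             if (k <= 0):
--                 return total % 1000000007
--         exp *= 2
-- ===== SOURCE B (Python) =====
-- def solve(nums, k):
--     # Batch per bit level, then close the remaining flips with a geometric-sum formula.
--     MOD = 1000000007
--     total = sum(nums)
--     if k <= 0: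
--         return total % MOD
--     t = max(n if n >= 0 else -n - 1 for n in nums)
--     exp = 1
--     while exp <= t and k > 0:
--         c = sum(1 for n in nums if n & exp == 0)
--         take = min(c, k)
--         total += exp * take
--         k -= take
--         exp *= 2
--     if k > 0:
--         p = sum(1 for n in nums if n >= 0)
--         q, r = divmod(k, p)
--         total += p * exp * (pow(2, q) - 1) + r * exp * pow(2, q)
--     return total % MOD
-- ===== Notes on version B (the rewrite author's own statement) =====
-- stated objective: alternative
-- what changed: B batch-counts the zero-bit elements once per bit level and takes min(count,k) flips at that level, then closes all remaining flips above the top bit with a geometric-sum formula, instead of A's per-element flip loop that iterates k times (an asymptotic win only when k dominates the list size); Pre_ excludes empty lists (A loops forever) and all-negative lists with k>0, where A diverges once the finitely many zero bits of negative numbers run out and B raises ZeroDivisionError.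
-- intended difference: For k < 0 with an even first element A still performs one flip (its guard tests k != 0 instead of k > 0) and returns (sum+1) mod 1000000007; B performs no flips whenever k <= 0 and returns sum mod 1000000007, the intended value. — e.g. on solve([2], -1): A returns 3, B returns 2
-- outside the precondition, e.g. on solve([-2], 2): A does not finish within the time limit, B raises ZeroDivisionError; on solve([-2], 1): A returns 1000000006, B returns 1000000006
import Mathlib
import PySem

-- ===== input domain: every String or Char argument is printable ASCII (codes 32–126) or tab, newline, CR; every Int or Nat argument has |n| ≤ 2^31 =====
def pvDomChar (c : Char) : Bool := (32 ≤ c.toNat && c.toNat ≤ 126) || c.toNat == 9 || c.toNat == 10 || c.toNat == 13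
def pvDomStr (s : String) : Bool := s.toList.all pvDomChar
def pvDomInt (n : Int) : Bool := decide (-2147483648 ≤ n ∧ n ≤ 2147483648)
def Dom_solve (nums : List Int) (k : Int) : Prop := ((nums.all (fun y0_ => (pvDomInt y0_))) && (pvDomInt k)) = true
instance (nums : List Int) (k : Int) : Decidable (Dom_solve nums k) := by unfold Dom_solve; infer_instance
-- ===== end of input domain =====

-- B batch-counts the zero-bit elements once per bit level (min(count,k) flips at a level)
-- and closes the remaining flips above the top bit with a geometric-sum formula, instead
-- of A's per-element flip loop (an alternative algorithm; same measured cost).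

-- ===== PORT A =====
-- the inner `for n in nums` loop: .inl r = `return r`, .inr (total, k) = loop finished
def innerA (exp : Int) : List Int → Int → Int → Sum Int (Int × Int)
  | [], total, k => .inr (total, k)
  | n :: rest, total, k =>
    let total' := if PySem.Int.band n exp = 0 ∧ k ≠ 0 then total + exp else total
    let k' := if PySem.Int.band n exp = 0 ∧ k ≠ 0 then k - 1 else k
    if k' ≤ 0 then .inl (PySem.Int.mod total' 1000000007)
    else innerA exp rest total' k'

-- the `while True` loop; the fuel only bounds the number of levels (`solveFuel` is proved
-- sufficient on Pre_ below — on Pre_ the 0-branch is never reached; Python A diverges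
-- exactly where it would be)
def outerA : Nat → Int → List Int → Int → Int → Int
  | 0, _, _, _, _ => 0
  | fuel+1, exp, nums, total, k =>
    match innerA exp nums total k with
    | .inl r => r
    | .inr (t, k') => outerA fuel (exp * 2) nums t k'

def solveFuel (nums : List Int) (k : Int) : Nat := (nums.map Int.natAbs).sum + k.toNat + 2

def solve (nums : List Int) (k : Int) : Int :=
  outerA (solveFuel nums k) 1 nums (nums.foldl (· + ·) 0) k

-- ===== PORT B =====
-- count of n in nums with n & e == 0  (Source B: sum(1 for n in nums if n & exp == 0))
def countZ (nums : List Int) (e : Int) : Int :=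
  ((nums.countP (fun n => PySem.Int.band n e == 0) : Nat) : Int)

-- t = max(n if n >= 0 else -n - 1 for n in nums); 0 on [] (Source B raises there, outside Pre_)
def tmaxB (nums : List Int) : Int :=
  (PySem.List.max? (nums.map (fun n => if 0 ≤ n then n else -n - 1)) (fun y => y)).getD 0

-- the `while exp <= t and k > 0` loop; returns (total, k, exp)
def loopB (nums : List Int) (t : Int) (total k exp : Int) (hexp : 0 < exp) : Int × Int × Int :=
  if h : exp ≤ t ∧ 0 < k then
    let c := countZ nums exp
    let take := min c k
    loopB nums t (total + exp * take) (k - take) (exp * 2) (by omega)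
  else (total, k, exp)
termination_by (t + 1 - exp).toNat
decreasing_by omega

def solve_alt (nums : List Int) (k : Int) : Int :=
  let total := nums.foldl (· + ·) 0
  if k ≤ 0 then PySem.Int.mod total 1000000007
  else
    match loopB nums (tmaxB nums) total k 1 (by norm_num) with
    | (total', k', exp') =>
      if 0 < k' then
        let p : Int := ((nums.countP (fun n => decide (0 ≤ n)) : Nat) : Int)
        match PySem.Int.divmod? k' p with
        | none => 0   -- Source B raises ZeroDivisionError here (p = 0); outside Pre_
        | some (q, r) =>
          -- pow(2, q): q ≥ 0 whenever this branch is reached inside Pre_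
          PySem.Int.mod (total' + p * exp' * (2 ^ q.toNat - 1) + r * exp' * 2 ^ q.toNat) 1000000007
      else PySem.Int.mod total' 1000000007

-- ===== PRECONDITION & SPEC =====
-- Pre_ excludes empty lists (A loops forever) and all-negative lists with k > 0, where A
-- diverges once the finitely many zero bits of negative numbers run out and B raises
-- ZeroDivisionError (on part of that region A happens to return and agrees with B).
def Pre_solve (nums : List Int) (k : Int) : Prop :=
  nums ≠ [] ∧ (k ≤ 0 ∨ ∃ n ∈ nums, 0 ≤ n)
instance (nums : List Int) (k : Int) : Decidable (Pre_solve nums k) := by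
  unfold Pre_solve; infer_instance

def pvWitness_solve : List Int × Int := ([3, -1, 4], 5)

-- For k < 0 with an even first element A still performs one flip (its guard tests k != 0
-- instead of k > 0) and returns (sum+1) mod 1000000007; B performs no flips whenever
-- k <= 0 and returns sum mod 1000000007, the intended value.
def D_solve (nums : List Int) (k : Int) : Prop :=
  k < 0 ∧ ∃ h ∈ nums.head?, h % 2 = 0
instance (nums : List Int) (k : Int) : Decidable (D_solve nums k) := by
  unfold D_solve; infer_instance

def Spec_solve (nums : List Int) (k : Int) (out : Int) : Prop :=
  ¬ D_solve nums k → out = solve_alt nums k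
instance (nums : List Int) (k : Int) (out : Int) : Decidable (Spec_solve nums k out) := by
  unfold Spec_solve; infer_instance

def pvDiffWitness_solve : List Int × Int := ([2], -1)
def pvDiffWitnessOut_solve : Int × Int := (3, 2)

-- ===== CLAIM (what is proved, stated in full; the proofs are below) =====
def Claim_unchanged_solve : Prop := ∀ (nums : List Int) (k : Int), Dom_solve nums k → Pre_solve nums k → Spec_solve nums k (solve nums k)
def Claim_changed_solve : Prop := Dom_solve (pvDiffWitness_solve.1) (pvDiffWitness_solve.2) ∧ Pre_solve (pvDiffWitness_solve.1) (pvDiffWitness_solve.2) ∧ D_solve (pvDiffWitness_solve.1) (pvDiffWitness_solve.2) ∧ solve (pvDiffWitness_solve.1) (pvDiffWitness_solve.2) = pvDiffWitnessOut_solve.1 ∧ solve_alt (pvDiffWitness_solve.1) (pvDiffWitness_solve.2) = pvDiffWitnessOut_solve.2 ∧ pvDiffWitnessOut_solve.1 ≠ pvDiffWitnessOut_solve.2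
def Claim_exact_solve : Prop := ∀ (nums : List Int) (k : Int), Dom_solve nums k → Pre_solve nums k → D_solve nums k → solve nums k ≠ solve_alt nums k

-- ===== LEMMAS AND PROOFS =====

-- the inner loop, entered with k > 0, either exhausts k at this level or scans the level
theorem innerA_pos (exp : Int) (nums : List Int) : ∀ (total k : Int), 0 < k →
    innerA exp nums total k =
      if k ≤ countZ nums exp
      then .inl (PySem.Int.mod (total + exp * k) 1000000007)
      else .inr (total + exp * countZ nums exp, k - countZ nums exp) := by
  induction nums with
  | nil =>
    intro total k hk
    simp [innerA, countZ]
    omega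
  | cons n rest ih =>
    intro total k hk
    by_cases hb : PySem.Int.band n exp = 0
    · have hc : countZ (n :: rest) exp = countZ rest exp + 1 := by
        simp [countZ, hb]
      by_cases h1 : k = 1
      · subst h1
        simp [innerA, hb, hc]
        unfold countZ; positivity
      · have hk2 : 0 < k - 1 := by omega
        rw [innerA]
        simp only [hb, true_and, if_pos (show k ≠ 0 by omega)]
        rw [if_neg (by omega)]
        rw [ih (total + exp) (k - 1) hk2, hc]
        by_cases hle : k - 1 ≤ countZ rest exp
        · rw [if_pos hle, if_pos (by omega)]
          congr 2; ring
        · rw [if_neg hle, if_neg (by omega)]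
          simp only [Sum.inr.injEq, Prod.mk.injEq]
          constructor <;> ring
    · have hc : countZ (n :: rest) exp = countZ rest exp := by
        simp [countZ, hb]
      rw [innerA, hc]
      simp only [hb, false_and, if_false]
      rw [if_neg (by omega : ¬ k ≤ 0), ih total k hk]

-- once every level has exactly p qualifying elements, A's remaining levels sum to the
-- geometric closed form
theorem tailA (nums : List Int) (p : Int) (hp1 : 1 ≤ p) (i0 : Nat)
    (hbit : ∀ j : Nat, i0 ≤ j → countZ nums (2 ^ j) = p) :
    ∀ fuel (i : Nat), i0 ≤ i → ∀ total k : Int, 0 < k → k.toNat < fuel →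
      outerA fuel (2 ^ i) nums total k =
        PySem.Int.mod (total + p * 2 ^ i * (2 ^ (k / p).toNat - 1)
          + (k % p) * 2 ^ i * 2 ^ (k / p).toNat) 1000000007 := by
  intro fuel
  induction fuel with
  | zero => intro i hi total k hk hf; omega
  | succ fuel ih =>
    intro i hi total k hk hf
    rw [outerA, innerA_pos _ _ _ _ hk, hbit i hi]
    by_cases hle : k ≤ p
    · rw [if_pos hle]
      by_cases heq : k = p
      · subst heq
        rw [Int.ediv_self (by omega), Int.emod_self]
        norm_num; congr 1; ring
      · rw [Int.ediv_eq_zero_of_lt (by omega) (by omega),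
            Int.emod_eq_of_lt (by omega) (by omega)]
        norm_num; congr 1; ring
    · rw [if_neg hle]
      have h2 : (2:Int) ^ i * 2 = 2 ^ (i+1) := by rw [pow_succ]
      rw [h2]
      show outerA fuel (2 ^ (i+1)) nums (total + 2 ^ i * p) (k - p) = _
      rw [ih (i+1) (by omega) _ _ (by omega) (by omega)]
      have hdiv : (k - p) / p = k / p - 1 := by
        have := Int.add_mul_ediv_right k (-1) (show p ≠ 0 by omega)
        have e : k + -1 * p = k - p := by ring
        rw [e] at this; omega
      have hmod : (k - p) % p = k % p := Int.sub_emod_right k p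
      have hq1 : 1 ≤ k / p := by
        rw [Int.le_ediv_iff_mul_le (by omega)]; omega
      rw [hdiv, hmod]
      have hqn : (k / p).toNat = (k / p - 1).toNat + 1 := by omega
      rw [hqn]
      congr 1
      rw [pow_succ, pow_succ]
      ring

theorem loopB_stop (nums : List Int) (t total k exp : Int) (hexp : 0 < exp)
    (h' : ¬(exp ≤ t ∧ 0 < k)) : loopB nums t total k exp hexp = (total, k, exp) := by
  rw [loopB]; simp [h']

theorem loopB_step (nums : List Int) (t total k exp : Int) (hexp : 0 < exp)
    (h1 : exp ≤ t) (h2 : 0 < k) :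
    loopB nums t total k exp hexp =
      loopB nums t (total + exp * min (countZ nums exp) k)
        (k - min (countZ nums exp) k) (exp * 2) (by omega) := by
  rw [loopB]; simp [h1, h2]

theorem loopB_congr (nums : List Int) (t total k : Int) (exp exp' : Int)
    (hexp : 0 < exp) (he : exp = exp') :
    loopB nums t total k exp hexp = loopB nums t total k exp' (he ▸ hexp) := by
  subst he; rfl

theorem countZ_nonneg (nums : List Int) (e : Int) : 0 ≤ countZ nums e := by
  unfold countZ; positivity

-- B's closing formula applied to the state B's loop left behind
def postB (p total' k' exp' : Int) : Int :=
  if 0 < k' then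
    PySem.Int.mod (total' + p * exp' * (2 ^ (k' / p).toNat - 1)
      + (k' % p) * exp' * 2 ^ (k' / p).toNat) 1000000007
  else PySem.Int.mod total' 1000000007

-- A's whole while-loop = B's counting loop followed by B's closing formula
theorem bridge (nums : List Int) (t p : Int) (hp1 : 1 ≤ p)
    (hbit : ∀ j : Nat, t < 2 ^ j → countZ nums (2 ^ j) = p) :
    ∀ fuel (i : Nat) (total k : Int), 0 < k → (t + 1 - 2 ^ i).toNat + k.toNat < fuel →
      (hx : (0:Int) < 2 ^ i) →
      outerA fuel (2 ^ i) nums total k =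
        (fun s => postB p s.1 s.2.1 s.2.2) (loopB nums t total k (2 ^ i) hx) := by
  intro fuel
  induction fuel with
  | zero => intro i total k hk hf hx; omega
  | succ fuel ih =>
    intro i total k hk hf hx
    by_cases hle : (2:Int) ^ i ≤ t
    · rw [outerA, innerA_pos _ _ _ _ hk]
      rw [loopB_step nums t total k _ hx hle hk]
      set c := countZ nums (2 ^ i) with hcdef
      have hc0 : 0 ≤ c := countZ_nonneg nums _
      by_cases hck : k ≤ c
      · rw [if_pos hck]
        rw [min_eq_right hck]
        rw [loopB_stop _ _ _ _ _ _ (by omega)]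
        simp only [postB]
        rw [if_neg (by omega)]
      · rw [if_neg hck]
        rw [min_eq_left (by omega)]
        show outerA fuel (2 ^ i * 2) nums (total + 2 ^ i * c) (k - c) = _
        have e : (2:Int) ^ i * 2 = 2 ^ (i + 1) := by rw [pow_succ]
        rw [loopB_congr nums t _ _ _ _ _ e]
        conv_lhs => rw [e]
        exact ih (i+1) _ _ (by omega)
          (by rw [← e]; have h1 : (0:Int) < 2 ^ i := hx; omega) (by positivity)
    · rw [loopB_stop _ _ _ _ _ _ (by omega)]
      simp only [postB]
      rw [if_pos hk]
      have hbit' : ∀ j : Nat, i ≤ j → countZ nums (2 ^ j) = p := by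
        intro j hj
        apply hbit
        calc t < 2 ^ i := by omega
          _ ≤ 2 ^ j := by exact pow_le_pow_right₀ (by norm_num) hj
      exact tailA nums p hp1 i hbit' (fuel+1) i le_rfl total k hk (by omega)

theorem cast_two_pow (j : Nat) : (2:Int) ^ j = ((2 ^ j : Nat) : Int) := by push_cast; ring

theorem band_two_pow_eq_zero (n : Int) (j : Nat) (h0 : 0 ≤ n) (h : n < 2 ^ j) :
    PySem.Int.band n (2 ^ j) = 0 := by
  have hc := cast_two_pow j
  unfold PySem.Int.band
  rw [if_pos h0, if_pos (by positivity : (0:Int) ≤ 2 ^ j), hc, Int.toNat_natCast]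
  rw [Nat.and_two_pow, Nat.testBit_lt_two_pow (by omega)]
  simp

theorem band_two_pow_ne_zero (n : Int) (j : Nat) (h0 : n < 0) (h : -n - 1 < 2 ^ j) :
    PySem.Int.band n (2 ^ j) ≠ 0 := by
  have hc := cast_two_pow j
  have hp : 0 < 2 ^ j := Nat.two_pow_pos j
  unfold PySem.Int.band
  rw [if_neg (by omega), if_pos (by positivity : (0:Int) ≤ 2 ^ j), hc, Int.toNat_natCast]
  rw [Nat.two_pow_and, Nat.testBit_lt_two_pow (by omega)]
  simp

-- above the top bit, exactly the nonnegative elements have a zero bit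
theorem countZ_big (nums : List Int) (j : Nat)
    (hub : ∀ n ∈ nums, (if 0 ≤ n then n else -n - 1) < 2 ^ j) :
    countZ nums (2 ^ j) = ((nums.countP (fun n => decide (0 ≤ n)) : Nat) : Int) := by
  unfold countZ
  congr 1
  apply List.countP_congr
  intro n hn
  have hb := hub n hn
  by_cases h0 : 0 ≤ n
  · rw [if_pos h0] at hb
    simp [band_two_pow_eq_zero n j h0 hb, h0]
  · rw [if_neg h0] at hb
    simp [band_two_pow_ne_zero n j (by omega) hb, h0]

theorem solve_spec : Claim_unchanged_solve := by
  intro nums k _hdom hpre hnd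
  obtain ⟨hne, hcase⟩ := hpre
  obtain ⟨n0, rest, rfl⟩ : ∃ n0 rest, nums = n0 :: rest := by
    cases nums with
    | nil => exact absurd rfl hne
    | cons a l => exact ⟨a, l, rfl⟩
  set nums := n0 :: rest
  by_cases hk0 : k ≤ 0
  · -- no flips requested: both return sum % MOD (head odd or k = 0, since ¬D_)
    have hband : ¬(PySem.Int.band n0 1 = 0 ∧ k ≠ 0) := by
      rintro ⟨hb, hkne⟩
      apply hnd
      refine ⟨by omega, n0, rfl, ?_⟩
      have := PySem.Int.band_one n0
      rw [PySem.Int.mod_eq_emod_of_pos (by norm_num)] at this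
      omega
    have hfuel : ∃ f, solveFuel nums k = f + 1 := ⟨solveFuel nums k - 1, by
      unfold solveFuel; omega⟩
    obtain ⟨f, hf⟩ := hfuel
    unfold solve solve_alt
    rw [hf, outerA, innerA]
    simp only [hband, if_false, if_pos (show k ≤ 0 from hk0)]
  · -- k > 0: some element is nonnegative
    have hex : ∃ n ∈ nums, 0 ≤ n := by
      rcases hcase with h | h
      · omega
      · exact h
    set p : Int := ((nums.countP (fun n => decide (0 ≤ n)) : Nat) : Int) with hpdef
    have hp1 : 1 ≤ p := by
      obtain ⟨x, hx, hx0⟩ := hex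
      have : 0 < nums.countP (fun n => decide (0 ≤ n)) := by
        rw [List.countP_pos_iff]; exact ⟨x, hx, by simpa using hx0⟩
      omega
    set t : Int := tmaxB nums with htdef
    -- max? of a nonempty list is some t, and t bounds every mapped element
    have hsome : PySem.List.max?
        (nums.map (fun n => if 0 ≤ n then n else -n - 1)) (fun y => y) = some t := by
      cases hm : PySem.List.max?
          (nums.map (fun n => if 0 ≤ n then n else -n - 1)) (fun y => y) with
      | none => rw [PySem.List.max?_eq_none_iff] at hm; simp at hm
      | some m => rw [htdef]; unfold tmaxB; rw [hm]; rfl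
    have hub : ∀ n ∈ nums, (if 0 ≤ n then n else -n - 1) ≤ t := by
      intro n hn
      exact PySem.List.max?_isMax hsome _ (List.mem_map_of_mem hn)
    have htmem : t ∈ nums.map (fun n => if 0 ≤ n then n else -n - 1) :=
      PySem.List.max?_mem hsome
    have ht0 : 0 ≤ t := by
      obtain ⟨n, _, he⟩ := List.mem_map.mp htmem
      rw [← he]
      split <;> omega
    have htS : t.toNat ≤ (nums.map Int.natAbs).sum := by
      obtain ⟨n, hn, he⟩ := List.mem_map.mp htmem
      have h1 : (if 0 ≤ n then n else -n - 1).toNat ≤ n.natAbs := by split <;> omega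
      have h2 : n.natAbs ≤ (nums.map Int.natAbs).sum :=
        List.single_le_sum (by simp) _ (List.mem_map_of_mem hn)
      omega
    have hbit : ∀ j : Nat, t < 2 ^ j → countZ nums (2 ^ j) = p := by
      intro j hj
      apply countZ_big
      intro n hn
      exact lt_of_le_of_lt (hub n hn) hj
    -- apply the bridge at exp = 1 = 2^0
    have h1 : (1:Int) = 2 ^ 0 := by norm_num
    have hx : (0:Int) < 2 ^ 0 := by norm_num
    have hfuel : (t + 1 - 2 ^ 0).toNat + k.toNat < solveFuel nums k := by
      have : ((2:Int) ^ 0) = 1 := by norm_num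
      unfold solveFuel
      omega
    have hA := bridge nums t p hp1 hbit (solveFuel nums k) 0 (nums.foldl (· + ·) 0) k
      (by omega) hfuel hx
    unfold solve
    conv_lhs => rw [h1]
    rw [hA]
    -- now reduce solve_alt to the same postB expression
    unfold solve_alt
    rw [if_neg hk0]
    rw [loopB_congr nums (tmaxB nums) _ _ _ _ (by norm_num) h1]
    rcases hL : loopB nums t (nums.foldl (· + ·) 0) k (2 ^ 0) (h1 ▸ (by norm_num)) with
      ⟨total', k', exp'⟩
    dsimp only [postB]
    by_cases hk' : 0 < k'
    · rw [if_pos hk', if_pos hk']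
      have hdm : PySem.Int.divmod? k' p = some (k' / p, k' % p) := by
        unfold PySem.Int.divmod?
        rw [if_neg (by omega)]
        rw [Int.fdiv_eq_ediv, Int.fmod_eq_emod]
        simp [show (0:Int) ≤ p by omega]
      rw [hdm]
    · rw [if_neg hk', if_neg hk']

theorem solve_changed : Claim_changed_solve := by
  unfold Claim_changed_solve; decide

theorem solve_tight : Claim_exact_solve := by
  intro nums k _hdom hpre hd
  obtain ⟨hne, _⟩ := hpre
  obtain ⟨hkneg, h0, hh0, heven⟩ := hd
  obtain ⟨n0, rest, rfl⟩ : ∃ n0 rest, nums = n0 :: rest := by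
    cases nums with
    | nil => exact absurd rfl hne
    | cons a l => exact ⟨a, l, rfl⟩
  have hn0 : h0 = n0 := by simp at hh0; omega
  subst hn0
  -- A performs one flip: band h0 1 = h0 % 2 = 0 and k ≠ 0
  have hband : PySem.Int.band h0 1 = 0 := by
    have := PySem.Int.band_one h0
    rw [PySem.Int.mod_eq_emod_of_pos (by norm_num)] at this
    omega
  have hfuel : ∃ f, solveFuel (h0 :: rest) k = f + 1 := ⟨solveFuel (h0 :: rest) k - 1, by
    unfold solveFuel; omega⟩
  obtain ⟨f, hf⟩ := hfuel
  unfold solve solve_alt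
  rw [hf, outerA, innerA]
  simp only [hband, true_and, if_pos (show k ≠ 0 by omega), if_pos (show k - 1 ≤ 0 by omega),
    if_pos (show k ≤ 0 by omega)]
  set s := (h0 :: rest).foldl (· + ·) 0
  rw [PySem.Int.mod_eq_emod_of_pos (by norm_num), PySem.Int.mod_eq_emod_of_pos (by norm_num)]
  omega
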